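-- pv_equiv track=rewrite | github.com/Sumedha494/DSA-Questions | move_negative_number_to_start.py | move_negatives_method3
-- ===== SOURCE A (Python) =====
-- def move_negatives_method3(arr):
--     """
--     Method 3: Extra Space Use karke
--     Time Complexity: O(n)
--     Space Complexity: O(n)
--     """
--     negative = []
--     positive = []
--
--     # Negative aur positive ko alag karo
--     for num in arr:
--         if num < 0:
--             negative.append(num)
--         else:
--             positive.append(num)
--
--     # Dono ko combine karo
--     return negative + positive
-- ===== SOURCE B (Python) =====
-- def move_negatives_method3(arr):
--     # Stable sort on the sign predicate: negatives (key False) before non-negatives (key True).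
--     return sorted(arr, key=lambda x: x >= 0)
-- ===== Notes on version B (the rewrite author's own statement) =====
-- stated objective: idiomatic
-- what changed: Replaces the two-bucket loop plus concatenation with a single stable sort keyed on the sign predicate (sorted(arr, key=lambda x: x >= 0)).
import Mathlib
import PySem

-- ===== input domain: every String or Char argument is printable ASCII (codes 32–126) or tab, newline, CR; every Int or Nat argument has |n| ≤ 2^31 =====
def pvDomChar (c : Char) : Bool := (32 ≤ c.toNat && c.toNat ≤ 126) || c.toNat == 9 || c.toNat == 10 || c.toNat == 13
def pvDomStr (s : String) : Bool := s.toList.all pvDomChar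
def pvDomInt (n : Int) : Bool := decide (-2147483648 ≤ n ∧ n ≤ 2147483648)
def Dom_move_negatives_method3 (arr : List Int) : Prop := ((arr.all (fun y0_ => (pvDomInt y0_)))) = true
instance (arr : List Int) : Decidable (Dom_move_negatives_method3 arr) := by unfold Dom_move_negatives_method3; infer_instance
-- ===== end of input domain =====

-- B replaces A's two-bucket partition loop with one stable sort on the sign predicate (idiomatic; not faster).

-- ===== PORT A =====
-- A: one pass splitting into `negative` and `positive` buckets, then concatenation.
def move_negatives_method3 (arr : List Int) : List Int :=
  let st := arr.foldl
    (fun (st : List Int × List Int) num =>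
      if num < 0 then (st.1 ++ [num], st.2) else (st.1, st.2 ++ [num]))
    ([], [])
  st.1 ++ st.2

-- ===== PORT B =====
-- B: sorted(arr, key=lambda x: x >= 0) — stable sort, False (negatives) before True.
def move_negatives_method3_alt (arr : List Int) : List Int :=
  PySem.List.sorted arr (fun x => decide (x ≥ 0)) false

-- ===== PRECONDITION & SPEC =====
def Spec_move_negatives_method3 (arr : List Int) (out : List Int) : Prop := out = move_negatives_method3_alt arr
instance (arr : List Int) (out : List Int) : Decidable (Spec_move_negatives_method3 arr out) := by unfold Spec_move_negatives_method3; infer_instance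

-- ===== CLAIM (what is proved, stated in full; the proofs are below) =====
def Claim_equal_move_negatives_method3 : Prop := ∀ (arr : List Int), Dom_move_negatives_method3 arr → Spec_move_negatives_method3 arr (move_negatives_method3 arr)

-- ===== LEMMAS AND PROOFS =====

-- the comparator used by PySem's stable insertion sort for B's key
def pvBefore (a b : Int) : Bool := decide ((decide (a ≥ 0) : Bool) < (decide (b ≥ 0) : Bool))

theorem pvBefore_pos (x y : Int) (hx : 0 ≤ x) : pvBefore x y = false := by
  simp [pvBefore, Bool.lt_iff, hx]

theorem ins_pos (x : Int) (hx : 0 ≤ x) (L : List Int) :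
    PySem.List.insertBy pvBefore x L = L ++ [x] := by
  apply PySem.List.insertBy_of_forall_not_before
  intro y _; simp [pvBefore_pos x y hx]

theorem ins_neg (x : Int) (hx : x < 0) (N P : List Int)
    (hN : ∀ n ∈ N, n < 0) (hP : ∀ p ∈ P, 0 ≤ p) :
    PySem.List.insertBy pvBefore x (N ++ P) = N ++ x :: P := by
  induction N with
  | nil =>
    cases P with
    | nil => simp [PySem.List.insertBy]
    | cons p P' =>
      have hp : 0 ≤ p := hP p (by simp)
      have : pvBefore x p = true := by
        simp [pvBefore, Bool.lt_iff, not_le.mpr hx, hp]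
      simp [PySem.List.insertBy, this]
  | cons n N' ih =>
    have hn : n < 0 := hN n (by simp)
    have : pvBefore x n = false := by
      simp [pvBefore, Bool.lt_iff, not_le.mpr hn]
    simp only [List.cons_append, PySem.List.insertBy, this, Bool.false_eq_true, if_false]
    exact congrArg (n :: ·) (ih (fun m hm => hN m (by simp [hm])))

theorem loop_eq (arr N P : List Int)
    (hN : ∀ n ∈ N, n < 0) (hP : ∀ p ∈ P, 0 ≤ p) :
    arr.foldl (fun acc x => PySem.List.insertBy pvBefore x acc) (N ++ P) =
      (arr.foldl
        (fun (st : List Int × List Int) num =>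
          if num < 0 then (st.1 ++ [num], st.2) else (st.1, st.2 ++ [num]))
        (N, P)).1
      ++ (arr.foldl
        (fun (st : List Int × List Int) num =>
          if num < 0 then (st.1 ++ [num], st.2) else (st.1, st.2 ++ [num]))
        (N, P)).2 := by
  induction arr generalizing N P with
  | nil => simp
  | cons x t ih =>
    by_cases hx : x < 0
    · have h1 : PySem.List.insertBy pvBefore x (N ++ P) = (N ++ [x]) ++ P := by
        rw [ins_neg x hx N P hN hP]; simp
      simp only [List.foldl_cons, hx, if_true, h1]
      exact ih (N ++ [x]) P
        (fun n hn => by rcases List.mem_append.mp hn with h | h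
                        · exact hN n h
                        · simp at h; omega) hP
    · have hx' : 0 ≤ x := by omega
      have h1 : PySem.List.insertBy pvBefore x (N ++ P) = N ++ (P ++ [x]) := by
        rw [ins_pos x hx' (N ++ P)]; simp
      simp only [List.foldl_cons, hx, if_false, h1]
      exact ih N (P ++ [x]) hN
        (fun p hp => by rcases List.mem_append.mp hp with h | h
                        · exact hP p h
                        · simp at h; omega)

-- ===== VERDICT (by name: the statement is the Claim_ definition above) =====
theorem move_negatives_method3_spec : Claim_equal_move_negatives_method3 := by
  intro arr _
  unfold Spec_move_negatives_method3 move_negatives_method3 move_negatives_method3_alt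
  rw [PySem.List.sorted_eq_foldl_insertBy]
  have := loop_eq arr [] [] (by simp) (by simp)
  simp only [List.nil_append] at this
  exact this.symm
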